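-- pv_equiv track=rewrite | github.com/Icesab/llm_cp | run_vanilla_split_conformal.py | compute_group_boundaries
-- ===== SOURCE A (Python) =====
-- from typing import Dict, List
--
-- GROUP_COLOR = {
--     "computer_security": "C0",
--     "high_school_computer_science": "C0",
--     "college_computer_science": "C0",
--     "machine_learning": "C0",
--     "formal_logic": "C0",
--     "high_school_biology": "C2",
--     "anatomy": "C2",
--     "clinical_knowledge": "C2",
--     "college_medicine": "C2",
--     "professional_medicine": "C2",
--     "college_chemistry": "C2",
--     "marketing": "C1",
--     "public_relations": "C1",
--     "management": "C1",
--     "business_ethics": "C1",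
--     "professional_accounting": "C1",
-- }
--
-- def compute_group_boundaries(subject_ids: List[str]) -> List[int]:
--     boundaries = []
--     previous_color = None
--     for index, subject_id in enumerate(subject_ids):
--         current_color = GROUP_COLOR[subject_id]
--         if previous_color is not None and current_color != previous_color:
--             boundaries.append(index)
--         previous_color = current_color
--     return boundaries
-- ===== SOURCE B (Python) =====
-- from itertools import groupby
-- from typing import Dict, List
--
-- GROUP_COLOR = {
--     "computer_security": "C0",
--     "high_school_computer_science": "C0",
--     "college_computer_science": "C0",
--     "machine_learning": "C0",
--     "formal_logic": "C0",
--     "high_school_biology": "C2",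
--     "anatomy": "C2",
--     "clinical_knowledge": "C2",
--     "college_medicine": "C2",
--     "professional_medicine": "C2",
--     "college_chemistry": "C2",
--     "marketing": "C1",
--     "public_relations": "C1",
--     "management": "C1",
--     "business_ethics": "C1",
--     "professional_accounting": "C1",
-- }
--
-- def compute_group_boundaries(subject_ids: List[str]) -> List[int]:
--     colors = [GROUP_COLOR[s] for s in subject_ids]
--     offsets = []
--     total = 0
--     for _, run in groupby(colors):
--         total += sum(1 for _ in run)
--         offsets.append(total)
--     return offsets[:-1]
-- ===== Notes on version B (the rewrite author's own statement) =====
-- stated objective: alternative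
-- what changed: Replaces the index-wise scan with a previous_color state variable by building the color list first, grouping it into runs of equal consecutive colors (itertools.groupby), and emitting the cumulative run lengths minus the final total as the boundaries.
import Mathlib
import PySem

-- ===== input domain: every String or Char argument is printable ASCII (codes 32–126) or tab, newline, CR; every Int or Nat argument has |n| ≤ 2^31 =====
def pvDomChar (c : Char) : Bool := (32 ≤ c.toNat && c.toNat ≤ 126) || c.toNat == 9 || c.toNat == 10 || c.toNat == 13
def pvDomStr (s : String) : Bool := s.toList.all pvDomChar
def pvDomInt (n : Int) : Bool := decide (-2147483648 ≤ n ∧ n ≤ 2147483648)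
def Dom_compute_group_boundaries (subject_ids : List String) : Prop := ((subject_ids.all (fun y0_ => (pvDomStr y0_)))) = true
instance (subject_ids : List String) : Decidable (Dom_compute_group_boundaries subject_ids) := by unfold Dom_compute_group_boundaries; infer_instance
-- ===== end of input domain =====

-- B groups the color list into runs of equal consecutive colors and returns the
-- cumulative run lengths except the final total, instead of A's index-wise scan
-- with a previous-color state variable (objective: alternative, same cost).

-- ===== PORT A =====
def pvGroupColor : PySem.Dict String String := PySem.Dict.ofList
  [("computer_security", "C0"), ("high_school_computer_science", "C0"),
   ("college_computer_science", "C0"), ("machine_learning", "C0"), ("formal_logic", "C0"),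
   ("high_school_biology", "C2"), ("anatomy", "C2"), ("clinical_knowledge", "C2"),
   ("college_medicine", "C2"), ("professional_medicine", "C2"), ("college_chemistry", "C2"),
   ("marketing", "C1"), ("public_relations", "C1"), ("management", "C1"),
   ("business_ethics", "C1"), ("professional_accounting", "C1")]

-- GROUP_COLOR[subject_id] raises KeyError on unknown subjects; those inputs are
-- excluded by Pre_, so the total form getD with default "" is exact on Pre_.
def compute_group_boundaries (subject_ids : List String) : List Int :=
  ((PySem.List.enumerate subject_ids 0).foldl
    (fun (st : List Int × Option String) p =>
      let current_color := pvGroupColor.getD p.2 ""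
      let boundaries :=
        match st.2 with
        | some prev => if current_color ≠ prev then st.1 ++ [p.1] else st.1
        | none => st.1
      (boundaries, some current_color))
    ([], none)).1

-- ===== PORT B =====
-- hand port of itertools.groupby on a list of strings: maximal runs of equal
-- consecutive elements, in order (exact: groupby yields exactly these runs)
def pvChunkRuns : List String → List (List String)
  | [] => []
  | x :: xs => (x :: xs.takeWhile (· == x)) :: pvChunkRuns (xs.dropWhile (· == x))
termination_by l => l.length
decreasing_by
  simpa using Nat.lt_succ_of_le (List.length_dropWhile_le (· == x) xs)

def compute_group_boundaries_alt (subject_ids : List String) : List Int :=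
  let colors := subject_ids.map (fun s => pvGroupColor.getD s "")
  (((pvChunkRuns colors).foldl
      (fun (st : List Int × Int) run =>
        (st.1 ++ [st.2 + (run.length : Int)], st.2 + (run.length : Int)))
      ([], 0)).1).dropLast

-- ===== PRECONDITION & SPEC =====
def pvValidSubjects : List String :=
  ["computer_security", "high_school_computer_science", "college_computer_science",
   "machine_learning", "formal_logic", "high_school_biology", "anatomy",
   "clinical_knowledge", "college_medicine", "professional_medicine",
   "college_chemistry", "marketing", "public_relations", "management",
   "business_ethics", "professional_accounting"]

-- Pre_ excludes exactly the inputs containing a subject id outside GROUP_COLOR,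
-- on which the Python A raises KeyError (B raises there too).
def Pre_compute_group_boundaries (subject_ids : List String) : Prop :=
  ∀ s ∈ subject_ids, s ∈ pvValidSubjects
instance (subject_ids : List String) : Decidable (Pre_compute_group_boundaries subject_ids) := by
  unfold Pre_compute_group_boundaries; infer_instance

def pvWitness_compute_group_boundaries : List String :=
  ["anatomy", "anatomy", "marketing", "formal_logic"]

def Spec_compute_group_boundaries (subject_ids : List String) (out : List Int) : Prop := out = compute_group_boundaries_alt subject_ids
instance (subject_ids : List String) (out : List Int) : Decidable (Spec_compute_group_boundaries subject_ids out) := by unfold Spec_compute_group_boundaries; infer_instance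

-- ===== CLAIM (what is proved, stated in full; the proofs are below) =====
def Claim_equal_compute_group_boundaries : Prop := ∀ (subject_ids : List String), Dom_compute_group_boundaries subject_ids → Pre_compute_group_boundaries subject_ids → Spec_compute_group_boundaries subject_ids (compute_group_boundaries subject_ids)

-- ===== LEMMAS AND PROOFS =====

-- A's loop, written structurally over the remaining subjects
def pvGoA (i : Int) (prev : Option String) : List String → List Int
  | [] => []
  | s :: ss =>
    let c := pvGroupColor.getD s ""
    match prev with
    | none => pvGoA (i + 1) (some c) ss
    | some p => if c ≠ p then i :: pvGoA (i + 1) (some c) ss else pvGoA (i + 1) (some c) ss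

-- the same loop over the precomputed colors
def pvGoC (i : Int) (prev : Option String) : List String → List Int
  | [] => []
  | c :: cs =>
    match prev with
    | none => pvGoC (i + 1) (some c) cs
    | some p => if c ≠ p then i :: pvGoC (i + 1) (some c) cs else pvGoC (i + 1) (some c) cs

-- cumulative run-length sums (B's loop, structurally)
def pvSums (t : Int) : List (List String) → List Int
  | [] => []
  | r :: rs => (t + (r.length : Int)) :: pvSums (t + (r.length : Int)) rs

-- pvSums without its last element
def pvGoB (t : Int) : List (List String) → List Int
  | [] => []
  | [_] => []
  | r :: r' :: rs => (t + (r.length : Int)) :: pvGoB (t + (r.length : Int)) (r' :: rs)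

-- A's loop body, named for the proofs (eta-equal to the lambda in the port)
def pvStepA (st : List Int × Option String) (p : Int × String) : List Int × Option String :=
  let current_color := pvGroupColor.getD p.2 ""
  let boundaries :=
    match st.2 with
    | some prev => if current_color ≠ prev then st.1 ++ [p.1] else st.1
    | none => st.1
  (boundaries, some current_color)

lemma pvPortA_eq (ss : List String) :
    compute_group_boundaries ss
      = ((PySem.List.enumerate ss 0).foldl pvStepA ([], none)).1 := rfl

lemma pvFoldA (ss : List String) : ∀ (k : Int) (bs : List Int) (prev : Option String),
    ((PySem.List.enumerate ss k).foldl pvStepA (bs, prev)).1 = bs ++ pvGoA k prev ss := by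
  induction ss with
  | nil => intro k bs prev; simp [PySem.List.enumerate_nil, pvGoA]
  | cons s ss ih =>
    intro k bs prev
    rw [PySem.List.enumerate_cons, List.foldl_cons]
    cases prev with
    | none =>
      show ((PySem.List.enumerate ss (k + 1)).foldl pvStepA
        (bs, some (pvGroupColor.getD s ""))).1 = _
      rw [ih]
      simp [pvGoA]
    | some p =>
      show ((PySem.List.enumerate ss (k + 1)).foldl pvStepA
        ((if pvGroupColor.getD s "" ≠ p then bs ++ [k] else bs),
          some (pvGroupColor.getD s ""))).1 = _
      by_cases h : pvGroupColor.getD s "" ≠ p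
      · rw [if_pos h, ih]
        simp [pvGoA, h]
      · rw [if_neg h, ih]
        simp [pvGoA, h]

lemma pvGoA_eq_goC (ss : List String) : ∀ (i : Int) (prev : Option String),
    pvGoA i prev ss = pvGoC i prev (ss.map (fun s => pvGroupColor.getD s "")) := by
  induction ss with
  | nil => intro i prev; simp [pvGoA, pvGoC]
  | cons s ss ih =>
    intro i prev
    cases prev <;> simp [pvGoA, pvGoC, ih]

lemma pvFoldB (chunks : List (List String)) : ∀ (bs : List Int) (t : Int),
    ((chunks.foldl
      (fun (st : List Int × Int) run =>
        (st.1 ++ [st.2 + (run.length : Int)], st.2 + (run.length : Int)))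
      (bs, t)).1) = bs ++ pvSums t chunks := by
  induction chunks with
  | nil => intro bs t; simp [pvSums]
  | cons r rs ih => intro bs t; simp [pvSums, ih, List.append_assoc]

lemma pvDropLast_sums (chunks : List (List String)) : ∀ (t : Int),
    (pvSums t chunks).dropLast = pvGoB t chunks := by
  induction chunks with
  | nil => intro t; simp [pvSums, pvGoB]
  | cons r rs ih =>
    intro t
    cases rs with
    | nil => simp [pvSums, pvGoB]
    | cons r' rs' =>
      show ((t + (r.length : Int)) :: pvSums _ (r' :: rs')).dropLast = _
      rw [List.dropLast_cons_of_ne_nil (by simp [pvSums])]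
      simp [pvGoB, ih]

lemma pvRunSkip (run : List String) : ∀ (rest : List String) (i : Int) (c : String),
    (∀ x ∈ run, x = c) →
    pvGoC i (some c) (run ++ rest) = pvGoC (i + (run.length : Int)) (some c) rest := by
  induction run with
  | nil => intro rest i c _; simp
  | cons x run ih =>
    intro rest i c h
    have hx : x = c := h x (by simp)
    have hrec := ih rest (i + 1) c (fun y hy => h y (by simp [hy]))
    simp only [List.cons_append, pvGoC, hx, ne_eq, not_true_eq_false, if_false]
    rw [hrec]
    congr 1
    simp only [List.length_cons]
    push_cast
    ring

lemma pvDropWhile_head (cs : List String) : ∀ (c d : String) (rest' : List String),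
    cs.dropWhile (· == c) = d :: rest' → d ≠ c := by
  induction cs with
  | nil => intro c d rest' h; simp [List.dropWhile] at h
  | cons x xs ih =>
    intro c d rest' h
    rw [List.dropWhile_cons] at h
    by_cases hx : x = c
    · simp [hx] at h
      exact ih c d rest' h
    · simp [hx] at h
      rw [← h.1]; exact hx

lemma pvMain (n : Nat) : ∀ (cs : List String) (c : String) (t : Int), cs.length ≤ n →
    pvGoC (t + 1) (some c) cs = pvGoB t (pvChunkRuns (c :: cs)) := by
  induction n with
  | zero =>
    intro cs c t hlen
    have : cs = [] := List.eq_nil_of_length_eq_zero (Nat.le_zero.mp hlen)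
    subst this
    simp [pvChunkRuns, pvGoC, pvGoB]
  | succ m ih =>
    intro cs c t hlen
    rw [pvChunkRuns]
    have hsplit : cs.takeWhile (· == c) ++ cs.dropWhile (· == c) = cs :=
      List.takeWhile_append_dropWhile
    have htake : ∀ x ∈ cs.takeWhile (· == c), x = c := by
      intro x hx
      exact eq_of_beq (List.mem_takeWhile_imp (p := fun y => y == c) (l := cs) hx)
    have hL : pvGoC (t + 1) (some c) cs
        = pvGoC (t + 1 + ((cs.takeWhile (· == c)).length : Int)) (some c)
            (cs.dropWhile (· == c)) := by
      conv_lhs => rw [← hsplit]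
      exact pvRunSkip _ _ _ _ htake
    cases hrest : cs.dropWhile (· == c) with
    | nil =>
      rw [hL, hrest]
      simp [pvChunkRuns, pvGoC, pvGoB]
    | cons d rest' =>
      have hdc : d ≠ c := pvDropWhile_head cs c d rest' hrest
      have hlen' : rest'.length ≤ m := by
        have h1 : (cs.dropWhile (· == c)).length ≤ cs.length :=
          List.length_dropWhile_le _ _
        rw [hrest] at h1
        simp at h1
        omega
      rw [hL, hrest]
      rw [pvChunkRuns]
      show pvGoC _ (some c) (d :: rest') = pvGoB t (_ :: _ :: _)
      rw [pvGoC]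
      simp only [hdc, ne_eq, not_false_eq_true, if_true]
      rw [pvGoB, ← pvChunkRuns]
      have harith : t + (((c :: cs.takeWhile (· == c)).length : Nat) : Int)
          = t + 1 + ((cs.takeWhile (· == c)).length : Int) := by
        simp only [List.length_cons]; push_cast; ring
      rw [harith]
      congr 1
      exact ih rest' d (t + 1 + ((cs.takeWhile (· == c)).length : Int)) hlen'

-- ===== VERDICT (by name: the statement is the Claim_ definition above) =====
theorem compute_group_boundaries_spec : Claim_equal_compute_group_boundaries := by
  intro ss _ _
  show compute_group_boundaries ss = compute_group_boundaries_alt ss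
  rw [pvPortA_eq, compute_group_boundaries_alt]
  rw [pvFoldA, List.nil_append, pvGoA_eq_goC, pvFoldB, List.nil_append, pvDropLast_sums]
  cases hcol : ss.map (fun s => pvGroupColor.getD s "") with
  | nil => simp [pvGoC, pvChunkRuns, pvGoB]
  | cons c cs =>
    rw [pvGoC]
    exact pvMain cs.length cs c 0 (le_refl _)
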